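-- pv_equiv track=rewrite | github.com/bjpl/learn_bash_from_session_data | tests/test_parser.py | count_pipes
-- ===== SOURCE A (Python) =====
-- def count_pipes(command):
--     """Count pipes in command (excluding those in quotes and || operator)."""
--     count = 0
--     in_quotes = None
--     i = 0
--     n = len(command)
--
--     while i < n:
--         char = command[i]
--         prev_char = command[i - 1] if i > 0 else None
--
--         if char in '"\'':
--             if in_quotes == char and prev_char != '\\':
--                 in_quotes = None
--             elif in_quotes is None:
--                 in_quotes = char
--         elif char == '|' and in_quotes is None:
--             # Check if it's || (logical OR) by looking at next char
--             next_char = command[i + 1] if i + 1 < n else None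
--             if prev_char != '|' and next_char != '|':
--                 count += 1
--
--         i += 1
--
--     return count
-- ===== SOURCE B (Python) =====
-- def count_pipes(command):
--     """Count pipes in command (excluding those in quotes and || operator)."""
--     n = len(command)
--     # Pass 1: mark for each index whether it lies outside quotes.
--     outside = []
--     in_quotes = None
--     for i in range(n):
--         ch = command[i]
--         outside.append(in_quotes is None)
--         if ch in '"\'':
--             if in_quotes == ch and (i == 0 or command[i - 1] != '\\'):
--                 in_quotes = None
--             elif in_quotes is None:
--                 in_quotes = ch
--     # Pass 2: count lone pipes at outside positions.
--     count = 0
--     for i in range(n):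
--         if (command[i] == '|' and outside[i]
--                 and (i == 0 or command[i - 1] != '|')
--                 and (i + 1 >= n or command[i + 1] != '|')):
--             count += 1
--     return count
-- ===== Notes on version B (the rewrite author's own statement) =====
-- stated objective: alternative
-- what changed: Replaces A's single stateful scan (quote tracking and pipe counting interleaved) by two separate passes: one pass builds a boolean mask of positions outside quotes, a second pass counts lone pipes at masked positions.
import Mathlib
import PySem

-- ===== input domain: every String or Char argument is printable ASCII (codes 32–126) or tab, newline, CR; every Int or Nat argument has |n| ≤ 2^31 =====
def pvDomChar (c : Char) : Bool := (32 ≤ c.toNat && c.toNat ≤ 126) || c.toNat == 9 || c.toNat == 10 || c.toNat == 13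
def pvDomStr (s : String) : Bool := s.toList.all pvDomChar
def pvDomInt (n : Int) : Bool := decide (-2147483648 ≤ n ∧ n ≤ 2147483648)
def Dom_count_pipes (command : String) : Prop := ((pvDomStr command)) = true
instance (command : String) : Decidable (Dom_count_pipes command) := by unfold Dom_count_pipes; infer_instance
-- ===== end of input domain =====

-- B replaces A's single interleaved scan by a mask-building pass plus a separate counting pass (alternative decomposition, same cost).

-- ===== PORT A =====
def count_pipes (command : String) : Int :=
  let cs := command.toList
  let n := cs.length
  ((List.range n).foldl (fun (st : Int × Option Char) i =>
    if cs.getD i ' ' = '"' ∨ cs.getD i ' ' = '\'' then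
      if st.2 = some (cs.getD i ' ') ∧ (if i > 0 then some (cs.getD (i-1) ' ') else none) ≠ some '\\' then
        (st.1, none)
      else if st.2 = none then (st.1, some (cs.getD i ' '))
      else st
    else if cs.getD i ' ' = '|' ∧ st.2 = none then
      if (if i > 0 then some (cs.getD (i-1) ' ') else none) ≠ some '|'
         ∧ (if i + 1 < n then some (cs.getD (i+1) ' ') else none) ≠ some '|' then
        (st.1 + 1, st.2)
      else st
    else st) ((0 : Int), (none : Option Char))).1

-- ===== PORT B =====
def count_pipes_alt (command : String) : Int :=
  let cs := command.toList
  let n := cs.length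
  -- pass 1: mask of positions outside quotes
  let outside := ((List.range n).foldl (fun (st : List Bool × Option Char) i =>
    (st.1 ++ [decide (st.2 = none)],
      if cs.getD i ' ' = '"' ∨ cs.getD i ' ' = '\'' then
        if st.2 = some (cs.getD i ' ') ∧ (i = 0 ∨ cs.getD (i-1) ' ' ≠ '\\') then none
        else if st.2 = none then some (cs.getD i ' ')
        else st.2
      else st.2)) (([] : List Bool), (none : Option Char))).1
  -- pass 2: count lone pipes at outside positions
  (((List.range n).filter (fun i =>
      decide (cs.getD i ' ' = '|') && outside.getD i false
      && decide (i = 0 ∨ cs.getD (i-1) ' ' ≠ '|')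
      && decide (i + 1 ≥ n ∨ cs.getD (i+1) ' ' ≠ '|'))).length : Int)

-- ===== PRECONDITION & SPEC =====
def Spec_count_pipes (command : String) (out : Int) : Prop := out = count_pipes_alt command
instance (command : String) (out : Int) : Decidable (Spec_count_pipes command out) := by unfold Spec_count_pipes; infer_instance

-- ===== CLAIM (what is proved, stated in full; the proofs are below) =====
def Claim_equal_count_pipes : Prop := ∀ (command : String), Dom_count_pipes command → Spec_count_pipes command (count_pipes command)

-- ===== LEMMAS AND PROOFS =====

-- quote state just before processing index k (shared characterisation of both ports)
def qstate (cs : List Char) : Nat → Option Char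
  | 0 => none
  | k+1 =>
    if cs.getD k ' ' = '"' ∨ cs.getD k ' ' = '\'' then
      if qstate cs k = some (cs.getD k ' ') ∧ (k = 0 ∨ cs.getD (k-1) ' ' ≠ '\\') then none
      else if qstate cs k = none then some (cs.getD k ' ')
      else qstate cs k
    else qstate cs k

def condC (cs : List Char) (n i : Nat) : Bool :=
  decide (cs.getD i ' ' = '|') && decide (qstate cs i = none)
  && decide (i = 0 ∨ cs.getD (i-1) ' ' ≠ '|')
  && decide (i + 1 ≥ n ∨ cs.getD (i+1) ' ' ≠ '|')

theorem prev_ne_iff (cs : List Char) (k : ℕ) (c : Char) :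
    ((if k > 0 then some (cs.getD (k-1) ' ') else none) ≠ some c)
      ↔ (k = 0 ∨ cs.getD (k-1) ' ' ≠ c) := by
  rcases Nat.eq_zero_or_pos k with hk | hk
  · subst hk; simp only [gt_iff_lt, Nat.lt_irrefl, if_false]; simp
  · simp only [gt_iff_lt, hk, if_pos]
    constructor
    · intro h; exact Or.inr (fun he => h (by rw [he]))
    · rintro (h | h)
      · omega
      · intro he; exact h (Option.some.inj he)

theorem next_ne_iff (cs : List Char) (n k : ℕ) (c : Char) :
    ((if k + 1 < n then some (cs.getD (k+1) ' ') else none) ≠ some c)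
      ↔ (k + 1 ≥ n ∨ cs.getD (k+1) ' ' ≠ c) := by
  rcases Nat.lt_or_ge (k+1) n with hk | hk
  · simp only [hk, if_pos]
    constructor
    · intro h; exact Or.inr (fun he => h (by rw [he]))
    · rintro (h | h)
      · omega
      · intro he; exact h (Option.some.inj he)
  · simp only [Nat.not_lt.mpr hk]; simp [hk]

theorem foldA_eq (cs : List Char) (n : ℕ) : ∀ k,
    (List.range k).foldl (fun (st : Int × Option Char) i =>
      if cs.getD i ' ' = '"' ∨ cs.getD i ' ' = '\'' then
        if st.2 = some (cs.getD i ' ') ∧ (if i > 0 then some (cs.getD (i-1) ' ') else none) ≠ some '\\' then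
          (st.1, none)
        else if st.2 = none then (st.1, some (cs.getD i ' '))
        else st
      else if cs.getD i ' ' = '|' ∧ st.2 = none then
        if (if i > 0 then some (cs.getD (i-1) ' ') else none) ≠ some '|'
           ∧ (if i + 1 < n then some (cs.getD (i+1) ' ') else none) ≠ some '|' then
          (st.1 + 1, st.2)
        else st
      else st) ((0 : Int), (none : Option Char))
    = ((((List.range k).filter (condC cs n)).length : Int), qstate cs k) := by
  intro k
  induction k with
  | zero => simp [qstate]
  | succ k ih =>
    rw [List.range_succ, List.foldl_append, ih, List.filter_append,
        List.foldl_cons, List.foldl_nil, List.length_append]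
    have hfk0 : condC cs n k = false → (List.filter (condC cs n) [k]).length = 0 := by
      intro hb; simp [List.filter, hb]
    have hfk1 : condC cs n k = true → (List.filter (condC cs n) [k]).length = 1 := by
      intro hb; simp [List.filter, hb]
    by_cases hq : cs.getD k ' ' = '"' ∨ cs.getD k ' ' = '\''
    · have hnp : ¬ cs.getD k ' ' = '|' := by
        rcases hq with h | h <;> rw [h] <;> decide
      have hc : condC cs n k = false := by
        simp only [condC, hnp, decide_false, Bool.false_and]
      rw [hfk0 hc, if_pos hq]
      simp only [qstate, if_pos hq, prev_ne_iff cs k '\\']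
      split_ifs <;> simp
    · simp only [if_neg hq, qstate]
      by_cases hp : cs.getD k ' ' = '|'
      · by_cases hq0 : qstate cs k = none
        · rw [if_pos ⟨hp, hq0⟩]
          simp only [prev_ne_iff cs k '|', next_ne_iff cs n k '|']
          by_cases hcond : (k = 0 ∨ cs.getD (k-1) ' ' ≠ '|') ∧ (k + 1 ≥ n ∨ cs.getD (k+1) ' ' ≠ '|')
          · have hc : condC cs n k = true := by
              simp only [condC, hp, hq0, hcond.1, hcond.2, decide_true, Bool.and_self]
            rw [if_pos hcond, hfk1 hc]
            simp only [Prod.mk.injEq, and_true]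
            push_cast; ring
          · have hc : condC cs n k = false := by
              unfold condC
              rcases Decidable.not_and_iff_not_or_not.mp hcond with h | h
              · rw [decide_eq_false h]; simp
              · rw [decide_eq_false h]; simp
            rw [if_neg hcond, hfk0 hc]
            simp
        · have hc : condC cs n k = false := by
            unfold condC; rw [decide_eq_false hq0]; simp
          rw [hfk0 hc]
          have : ¬ (cs.getD k ' ' = '|' ∧ qstate cs k = none) := fun h => hq0 h.2
          rw [if_neg this]
          simp
      · have hc : condC cs n k = false := by
          unfold condC; rw [decide_eq_false hp]; simp
        rw [hfk0 hc]
        have : ¬ (cs.getD k ' ' = '|' ∧ qstate cs k = none) := fun h => hp h.1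
        rw [if_neg this]
        simp

theorem foldB_eq (cs : List Char) : ∀ k,
    (List.range k).foldl (fun (st : List Bool × Option Char) i =>
      (st.1 ++ [decide (st.2 = none)],
        if cs.getD i ' ' = '"' ∨ cs.getD i ' ' = '\'' then
          if st.2 = some (cs.getD i ' ') ∧ (i = 0 ∨ cs.getD (i-1) ' ' ≠ '\\') then none
          else if st.2 = none then some (cs.getD i ' ')
          else st.2
        else st.2)) (([] : List Bool), (none : Option Char))
    = ((List.range k).map (fun i => decide (qstate cs i = none)), qstate cs k) := by
  intro k
  induction k with
  | zero => simp [qstate]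
  | succ k ih =>
    rw [List.range_succ, List.foldl_append, ih, List.map_append,
        List.foldl_cons, List.foldl_nil]
    simp [qstate]

theorem outside_getD (cs : List Char) (n i : ℕ) (hi : i < n) :
    ((List.range n).map (fun j => decide (qstate cs j = none))).getD i false
      = decide (qstate cs i = none) := by
  rw [List.getD_eq_getElem?_getD]
  simp [List.getElem?_map, List.getElem?_range hi]

-- ===== VERDICT (by name: the statement is the Claim_ definition above) =====
theorem count_pipes_spec : Claim_equal_count_pipes := by
  intro command _
  show count_pipes command = count_pipes_alt command
  simp only [count_pipes, count_pipes_alt]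
  rw [foldA_eq, foldB_eq]
  refine congrArg (fun l : List ℕ => (l.length : Int)) (List.filter_congr fun i hi => ?_)
  have hi' : i < command.toList.length := List.mem_range.mp hi
  simp only [condC, outside_getD _ _ _ hi']
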